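-- pv_equiv track=rewrite | github.com/pestilent01/csc506 | unittests.py | convertCorpusToWordList
-- ===== SOURCE A (Python) =====
-- def convertCorpusToWordList(corpus):
--     '''Convert a corpus of text to a list of words.'''
--     # Convert the corpus to a list of words
--     word_list = corpus.split(" ")
--     result = []
--     #add a space element between each word in the list except the last word
--     for i in range(len(word_list)):
--         result.append(word_list[i])
--         if i < (len(word_list)-1):
--             result.append(' ')
--
--     return result
-- ===== SOURCE B (Python) =====
-- import re
--
--
-- def convertCorpusToWordList(corpus):
--     '''Convert a corpus of text to a list of words.'''
--     # A capturing group on the single literal space makes re.split emit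
--     # every separator as its own list element, interleaved with the tokens.
--     return re.split('( )', corpus)
-- ===== Notes on version B (the rewrite author's own statement) =====
-- stated objective: idiomatic
-- what changed: Replaced the split-then-index-interleave loop by a single re.split with a capturing group on the literal space, which emits tokens and separators in one regex scan.
import Mathlib
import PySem

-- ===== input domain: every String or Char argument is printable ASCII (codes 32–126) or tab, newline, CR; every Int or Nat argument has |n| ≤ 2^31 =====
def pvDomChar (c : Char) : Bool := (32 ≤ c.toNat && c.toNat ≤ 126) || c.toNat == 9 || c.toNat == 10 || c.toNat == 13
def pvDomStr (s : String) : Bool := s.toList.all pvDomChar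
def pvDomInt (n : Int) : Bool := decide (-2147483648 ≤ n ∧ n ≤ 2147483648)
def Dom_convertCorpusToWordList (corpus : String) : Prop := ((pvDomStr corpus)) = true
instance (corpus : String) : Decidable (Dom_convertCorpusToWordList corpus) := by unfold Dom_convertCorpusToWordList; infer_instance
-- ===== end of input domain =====

-- B replaces A's split-then-interleave index loop by one regex scan (re.split on a captured space); idiomatic, same cost.

-- ===== PORT A =====
-- corpus.split(" "); then for i in range(len): append word, and a ' ' whenever i < len-1
def convertCorpusToWordList (corpus : String) : List String :=
  let wordList := (PySem.Chars.splitOn corpus.toList (" ".toList)).map String.ofList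
  (PySem.List.pyRange 0 (wordList.length : Int) 1).foldl
    (fun result i =>
      let result := result ++ [PySem.List.pyGetD wordList i ""]
      if i < (wordList.length : Int) - 1 then result ++ [" "] else result) []

-- ===== PORT B =====
-- Hand port of re.split('( )', corpus): the regex engine's single left-to-right scan,
-- emitting the token accumulated so far plus the captured " " at each literal space.
def reSplitSpace : List Char → List Char → List String
  | cur, [] => [String.ofList cur.reverse]
  | cur, c :: rest =>
    if c = ' ' then String.ofList cur.reverse :: " " :: reSplitSpace [] rest
    else reSplitSpace (c :: cur) rest

def convertCorpusToWordList_alt (corpus : String) : List String :=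
  reSplitSpace [] corpus.toList

-- ===== PRECONDITION & SPEC =====
def Spec_convertCorpusToWordList (corpus : String) (out : List String) : Prop := out = convertCorpusToWordList_alt corpus
instance (corpus : String) (out : List String) : Decidable (Spec_convertCorpusToWordList corpus out) := by unfold Spec_convertCorpusToWordList; infer_instance

-- ===== CLAIM (what is proved, stated in full; the proofs are below) =====
def Claim_equal_convertCorpusToWordList : Prop := ∀ (corpus : String), Dom_convertCorpusToWordList corpus → Spec_convertCorpusToWordList corpus (convertCorpusToWordList corpus)

-- ===== LEMMAS AND PROOFS =====

-- simple structural recursion computing split-on-one-space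
def pvSplit : List Char → List (List Char)
  | [] => [[]]
  | c :: cs =>
    if c = ' ' then [] :: pvSplit cs
    else
      match pvSplit cs with
      | [] => [[c]]
      | h :: t => (c :: h) :: t

def pvMapHead (f : List Char → List Char) : List (List Char) → List (List Char)
  | [] => []
  | h :: t => f h :: t

def pvInter : List (List Char) → List String
  | [] => []
  | [x] => [String.ofList x]
  | x :: y :: xs => String.ofList x :: " " :: pvInter (y :: xs)

def pvInterS : List String → List String
  | [] => []
  | [x] => [x]
  | x :: y :: xs => x :: " " :: pvInterS (y :: xs)

theorem pvSplit_ne_nil (cs : List Char) : pvSplit cs ≠ [] := by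
  cases cs with
  | nil => simp [pvSplit]
  | cons c cs =>
    simp only [pvSplit]
    split
    · simp
    · cases h : pvSplit cs <;> simp

theorem pvMapHead_id (p : List (List Char)) : pvMapHead (fun x => x) p = p := by
  cases p <;> simp [pvMapHead]

theorem go_eq (fuel : Nat) : ∀ (l cur : List Char) (acc : List (List Char)), l.length < fuel →
    PySem.Chars.splitOn.go [' '] fuel l cur acc
      = acc.reverse ++ pvMapHead (fun x => cur.reverse ++ x) (pvSplit l) := by
  induction fuel with
  | zero => intro l cur acc h; omega
  | succ fuel ih =>
    intro l cur acc h
    cases l with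
    | nil => simp [PySem.Chars.splitOn.go, pvSplit, pvMapHead]
    | cons c rest =>
      simp only [PySem.Chars.splitOn.go]
      by_cases hc : c = ' '
      · subst hc
        have hp : List.isPrefixOf [' '] (' ' :: rest) = true := by
          simp [List.isPrefixOf]
        simp only [hp, if_pos, List.length_cons, List.length_nil, List.drop_succ_cons,
          List.drop_zero]
        rw [ih rest [] (cur.reverse :: acc) (by simpa using Nat.lt_of_succ_lt_succ h)]
        rcases hps : pvSplit rest with _ | ⟨hd, tl⟩
        · exact absurd hps (pvSplit_ne_nil rest)
        · simp [pvSplit, pvMapHead, hps]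
      · have hp : List.isPrefixOf [' '] (c :: rest) = false := by
          simp [List.isPrefixOf, Ne.symm hc]
        simp only [hp, Bool.false_eq_true, if_false]
        rw [ih rest (c :: cur) acc (by simpa using Nat.lt_of_succ_lt_succ h)]
        simp only [pvSplit, hc, if_false]
        rcases hps : pvSplit rest with _ | ⟨hd, tl⟩
        · exact absurd hps (pvSplit_ne_nil rest)
        · simp [pvMapHead]

theorem splitOn_space (cs : List Char) : PySem.Chars.splitOn cs [' '] = pvSplit cs := by
  unfold PySem.Chars.splitOn
  rw [go_eq (cs.length + 1) cs [] [] (by omega)]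
  simp [pvMapHead_id]

theorem reSplitSpace_eq (cs : List Char) : ∀ cur,
    reSplitSpace cur cs = pvInter (pvMapHead (fun x => cur.reverse ++ x) (pvSplit cs)) := by
  induction cs with
  | nil => intro cur; simp [reSplitSpace, pvSplit, pvMapHead, pvInter]
  | cons c rest ih =>
    intro cur
    rcases hps : pvSplit rest with _ | ⟨hd, tl⟩
    · exact absurd hps (pvSplit_ne_nil rest)
    by_cases hc : c = ' '
    · subst hc
      simp only [reSplitSpace, if_pos, pvSplit, pvMapHead, hps]
      rw [ih []]
      simp [pvMapHead, hps, pvInter]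
    · simp only [reSplitSpace, if_neg hc, pvSplit, hps, pvMapHead]
      rw [ih (c :: cur)]
      simp [pvMapHead, hps]

theorem pvInterS_map (p : List (List Char)) : pvInterS (p.map String.ofList) = pvInter p := by
  induction p with
  | nil => simp [pvInterS, pvInter]
  | cons x xs ih =>
    cases xs with
    | nil => simp [pvInterS, pvInter]
    | cons y ys => simp only [List.map, pvInterS, pvInter]; rw [← ih]; simp

theorem pvInterS_append_singleton (ys : List String) (y : String) :
    pvInterS (ys ++ [y]) = ys.flatMap (fun w => [w, " "]) ++ [y] := by
  induction ys with
  | nil => simp [pvInterS]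
  | cons a ys ih =>
    cases ys with
    | nil => simp [pvInterS]
    | cons b ys =>
      simp only [List.cons_append] at ih ⊢
      simp only [pvInterS, List.flatMap_cons]
      rw [ih]; simp

theorem enum_flatMap (ys : List String) : ∀ (s : Int),
    (PySem.List.enumerate ys s).flatMap (fun p => [p.2, " "]) = ys.flatMap (fun w => [w, " "]) := by
  induction ys with
  | nil => intro s; simp [PySem.List.enumerate_nil]
  | cons a ys ih => intro s; simp [PySem.List.enumerate_cons, ih]

theorem foldA_eq (wl : List String) :
    (PySem.List.pyRange 0 (wl.length : Int) 1).foldl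
      (fun result i =>
        let result := result ++ [PySem.List.pyGetD wl i ""]
        if i < (wl.length : Int) - 1 then result ++ [" "] else result) []
      = pvInterS wl := by
  have hfold : (PySem.List.pyRange 0 (wl.length : Int) 1).foldl
      (fun result i =>
        let result := result ++ [PySem.List.pyGetD wl i ""]
        if i < (wl.length : Int) - 1 then result ++ [" "] else result) []
      = (PySem.List.enumerate wl 0).foldl
        (fun result p =>
          if p.1 < (wl.length : Int) - 1 then (result ++ [p.2]) ++ [" "] else result ++ [p.2]) [] := by
    rw [PySem.List.enumerate_eq_map_pyRange wl ""]
    rw [List.foldl_map]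
    rfl
  rw [hfold]
  induction wl using List.reverseRecOn with
  | nil => simp [PySem.List.enumerate_nil, pvInterS]
  | append_singleton ys y _ =>
    rw [PySem.List.enumerate_append]
    rw [List.foldl_append]
    have hpre : (PySem.List.enumerate ys 0).foldl
        (fun result p =>
          if p.1 < ((ys ++ [y]).length : Int) - 1 then (result ++ [p.2]) ++ [" "] else result ++ [p.2]) []
        = ys.flatMap (fun w => [w, " "]) := by
      rw [PySem.List.foldl_congr_mem
        (g := fun result p => result ++ [p.2, " "])]
      · rw [PySem.List.foldl_append_eq_flatMap]
        simp [enum_flatMap]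
      · intro acc p hp
        rcases (PySem.List.mem_enumerate_iff _ _ _).mp hp with ⟨k, hk, rfl⟩
        have hlt : ((0 : Int) + (k : Int)) < ((ys ++ [y]).length : Int) - 1 := by
          simp only [List.length_append, List.length_cons, List.length_nil]
          push_cast; omega
        simp [hk]
    rw [hpre]
    rw [pvInterS_append_singleton]
    simp only [PySem.List.enumerate_cons, PySem.List.enumerate_nil, List.foldl_cons,
      List.foldl_nil]
    simp

-- ===== VERDICT (by name: the statement is the Claim_ definition above) =====
theorem convertCorpusToWordList_spec : Claim_equal_convertCorpusToWordList := by
  intro corpus _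
  unfold Spec_convertCorpusToWordList convertCorpusToWordList convertCorpusToWordList_alt
  rw [reSplitSpace_eq corpus.toList []]
  simp only [List.reverse_nil, List.nil_append, pvMapHead_id]
  rw [foldA_eq]
  have : (" ".toList) = [' '] := rfl
  rw [this, splitOn_space, pvInterS_map]
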